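-- pv_equiv track=rewrite | github.com/JamieGrantham007/JCBoards_Outreach | places_to_csv.py | pick_email
-- ===== SOURCE A (Python) =====
-- from typing import Dict, List, Optional, Set, Tuple
--
-- PFX=("info@","kontakt@","hello@","sales@","bestellung@","shop@","service@","office@","mail@")
--
-- def pick_email(es:List[str])->Optional[str]:
--     if not es: return None
--     seen=set(); u=[]
--     for e in es:
--         x=e.strip().lower().strip(".,;:()<>[]{}\"'")
--         if x and x not in seen: seen.add(x); u.append(x)
--     for pf in PFX:
--         for e in u:
--             if e.startswith(pf): return e
--     return u[0] if u else None
-- ===== SOURCE B (Python) =====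
-- from typing import List, Optional
--
-- PFX=("info@","kontakt@","hello@","sales@","bestellung@","shop@","service@","office@","mail@")
-- PRIO={p:i for i,p in enumerate(PFX)}
--
-- def pick_email(es:List[str])->Optional[str]:
--     if not es: return None
--     seen=set(); u=[]
--     for e in es:
--         x=e.strip().lower().strip(".,;:()<>[]{}\"'")
--         if x and x not in seen: seen.add(x); u.append(x)
--     best_i=len(PFX); best_e=None
--     for e in u:
--         head,sep,_=e.partition('@')
--         if sep:
--             i=PRIO.get(head+sep)
--             if i is not None and i<best_i:
--                 best_i=i; best_e=e
--     if best_e is not None: return best_e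
--     return u[0] if u else None
-- ===== Notes on version B (the rewrite author's own statement) =====
-- stated objective: faster
-- what changed: Replaced A's nested prefix-by-prefix rescan of the deduplicated list with a single pass that looks each email's '<local-part>@' key up in a prefix-to-priority dictionary and keeps the first strict-minimum-priority match.
import Mathlib
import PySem

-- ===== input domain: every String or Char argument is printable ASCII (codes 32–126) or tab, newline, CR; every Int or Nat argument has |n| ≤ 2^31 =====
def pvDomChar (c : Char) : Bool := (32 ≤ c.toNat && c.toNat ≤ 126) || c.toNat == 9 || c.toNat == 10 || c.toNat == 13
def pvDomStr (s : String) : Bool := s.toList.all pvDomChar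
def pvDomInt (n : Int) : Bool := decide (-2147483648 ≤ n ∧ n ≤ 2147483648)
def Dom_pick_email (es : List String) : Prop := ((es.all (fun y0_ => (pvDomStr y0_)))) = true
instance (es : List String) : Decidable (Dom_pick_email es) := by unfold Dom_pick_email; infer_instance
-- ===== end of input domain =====

-- B replaces A's nested prefix-by-prefix scan with one pass over the deduplicated
-- list using a prefix->priority dictionary (objective: faster; measured).


-- ===== PORT A =====
def pfxList : List String :=
  ["info@","kontakt@","hello@","sales@","bestellung@","shop@","service@","office@","mail@"]

-- x = e.strip().lower().strip(".,;:()<>[]{}\"'")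
def normOne (e : String) : String :=
  PySem.Str.stripChars (PySem.Str.lower (PySem.Str.strip e)) ".,;:()<>[]{}\"'"

-- the dedup loop building u (identical in A and B; both ports call it)
def normUnique (es : List String) : List String :=
  (es.foldl (fun (st : PySem.Set String × List String) e =>
      let x := normOne e
      if x ≠ "" ∧ PySem.Set.contains st.1 x = false then (PySem.Set.add st.1 x, st.2 ++ [x])
      else st)
    ((PySem.Set.empty : PySem.Set String), [])).2

-- inner loop: for e in u: if e.startswith(pf): return e
def innerA (pf : String) : List String → Option String
  | [] => none
  | e :: t => if PySem.Str.startswith e pf then some e else innerA pf t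

-- outer loop: for pf in PFX: …
def outerA : List String → List String → Option String
  | [], _ => none
  | pf :: t, u =>
    match innerA pf u with
    | some e => some e
    | none => outerA t u

def pick_email (es : List String) : Option String :=
  if es = [] then none
  else
    let u := normUnique es
    match outerA pfxList u with
    | some e => some e
    | none => u.head?

-- ===== PORT B =====
-- PRIO = {p: i for i, p in enumerate(PFX)}  (indices are nonnegative, kept as Nat)
def prio : PySem.Dict String Nat :=
  pfxList.zipIdx.foldl (fun d p => d.insert p.1 p.2) PySem.Dict.empty

-- head, sep, _ = e.partition('@'); if sep: i = PRIO.get(head + sep); …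
-- partition ported by hand (exact): head = takeWhile (≠ '@'), sep nonempty iff '@' in e
def stepB (st : Nat × Option String) (e : String) : Nat × Option String :=
  if e.toList.contains '@' then
    match prio.get? (String.ofList (e.toList.takeWhile (· != '@') ++ ['@'])) with
    | some i => if i < st.1 then (i, some e) else st
    | none => st
  else st

def pick_email_alt (es : List String) : Option String :=
  if es = [] then none
  else
    let u := normUnique es
    let r := u.foldl stepB (pfxList.length, none)
    match r.2 with
    | some e => some e
    | none => u.head?

-- ===== PRECONDITION & SPEC =====
def Spec_pick_email (es : List String) (out : Option String) : Prop := out = pick_email_alt es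
instance (es : List String) (out : Option String) : Decidable (Spec_pick_email es out) := by unfold Spec_pick_email; infer_instance

-- ===== CLAIM (what is proved, stated in full; the proofs are below) =====
def Claim_equal_pick_email : Prop := ∀ (es : List String), Dom_pick_email es → Spec_pick_email es (pick_email es)

-- ===== LEMMAS AND PROOFS =====

-- index of the first pf in pfs with P pf, pfs.length if none (the order A scans)
def idxF (P : String → Bool) : List String → Nat
  | [] => 0
  | pf :: t => if P pf then 0 else idxF P t + 1

-- running minimum of f over u starting from b (the quantity B's fold tracks)
def mfold (f : String → Nat) (u : List String) (b : Nat) : Nat :=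
  u.foldl (fun a e => min a (f e)) b

def swP (e : String) : String → Bool := fun pf => PySem.Str.startswith e pf

-- abstract form of B's fold step
def stepM (f : String → Nat) (st : Nat × Option String) (e : String) : Nat × Option String :=
  if f e < st.1 then (f e, some e) else st

def idxPfx (e : String) : Nat := idxF (swP e) pfxList

lemma mfold_le_init (f : String → Nat) (u : List String) (b : Nat) : mfold f u b ≤ b := by
  induction u generalizing b with
  | nil => exact le_refl _
  | cons e t ih => exact le_trans (ih (min b (f e))) (min_le_left _ _)

lemma mfold_le_of_mem (f : String → Nat) {u : List String} {e : String} (h : e ∈ u) (b : Nat) :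
    mfold f u b ≤ f e := by
  induction u generalizing b with
  | nil => cases h
  | cons x t ih =>
    rcases List.mem_cons.mp h with rfl | hm
    · exact le_trans (mfold_le_init f t _) (min_le_right _ _)
    · exact ih hm _

lemma mfold_congr_mem {f g : String → Nat} {u : List String} (h : ∀ e ∈ u, f e = g e) (b : Nat) :
    mfold f u b = mfold g u b := by
  induction u generalizing b with
  | nil => rfl
  | cons e t ih =>
    simp only [mfold, List.foldl_cons] at *
    rw [h e (List.mem_cons_self), ih (fun x hx => h x (List.mem_cons_of_mem _ hx))]

lemma mfold_shift (g : String → Nat) (u : List String) (b : Nat) :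
    mfold (fun e => g e + 1) u (b + 1) = mfold g u b + 1 := by
  induction u generalizing b with
  | nil => rfl
  | cons e t ih =>
    simp only [mfold, List.foldl_cons] at *
    have hm : min (b + 1) (g e + 1) = min b (g e) + 1 := by omega
    rw [hm, ih]

lemma find?_congr_mem {p q : String → Bool} {u : List String} (h : ∀ e ∈ u, p e = q e) :
    u.find? p = u.find? q := by
  induction u with
  | nil => rfl
  | cons e t ih =>
    simp only [List.find?_cons]
    rw [h e (List.mem_cons_self), ih (fun x hx => h x (List.mem_cons_of_mem _ hx))]

lemma innerA_eq_find? (pf : String) (u : List String) :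
    innerA pf u = u.find? (fun e => PySem.Str.startswith e pf) := by
  induction u with
  | nil => rfl
  | cons e t ih =>
    simp only [innerA, List.find?_cons, ih]
    cases hsw : PySem.Str.startswith e pf <;> simp_all

-- A's nested scan returns the first element of u achieving the minimal prefix index
lemma outerA_eq (pfs : List String) (u : List String) :
    outerA pfs u =
      if mfold (fun e => idxF (swP e) pfs) u pfs.length < pfs.length then
        u.find? (fun e => idxF (swP e) pfs == mfold (fun e' => idxF (swP e') pfs) u pfs.length)
      else none := by
  induction pfs with
  | nil =>
    have h0 : mfold (fun e => idxF (swP e) []) u 0 ≤ 0 := mfold_le_init _ u 0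
    simp only [outerA, List.length_nil]
    rw [if_neg (by omega)]
  | cons pf t ih =>
    simp only [outerA]
    rw [innerA_eq_find?]
    cases hf : u.find? (fun e => PySem.Str.startswith e pf) with
    | some e0 =>
      have hmem : e0 ∈ u := List.mem_of_find?_eq_some hf
      have hsw : PySem.Chars.startswith e0.toList pf.toList = true := by
        have := List.find?_some hf; simpa using this
      have hidx : idxF (swP e0) (pf :: t) = 0 := by simp [idxF, swP, hsw]
      have hm : mfold (fun e => idxF (swP e) (pf :: t)) u (pf :: t).length = 0 := by
        have := mfold_le_of_mem (fun e => idxF (swP e) (pf :: t)) hmem (pf :: t).length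
        omega
      rw [hm, if_pos (by simp)]
      show some e0 = _
      rw [← hf]
      apply find?_congr_mem
      intro e _
      simp only [idxF, swP]
      by_cases h : PySem.Chars.startswith e.toList pf.toList = true
      · simp [h]
      · simp [h]
    | none =>
      have hnone : ∀ e ∈ u, PySem.Chars.startswith e.toList pf.toList = false := by
        intro e he
        have := List.find?_eq_none.mp hf e he
        simpa using this
      have hpt : ∀ e ∈ u, idxF (swP e) (pf :: t) = idxF (swP e) t + 1 := by
        intro e he
        simp [idxF, swP, hnone e he]
      have hmc : mfold (fun e => idxF (swP e) (pf :: t)) u (pf :: t).length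
          = mfold (fun e => idxF (swP e) t) u t.length + 1 := by
        rw [mfold_congr_mem (fun e he => hpt e he)]
        simpa using mfold_shift (fun e => idxF (swP e) t) u t.length
      show outerA t u = _
      rw [ih, hmc]
      by_cases hlt : mfold (fun e => idxF (swP e) t) u t.length < t.length
      · have hlt' : mfold (fun e => idxF (swP e) t) u t.length + 1 < (pf :: t).length := by
          simp only [List.length_cons]; omega
        rw [if_pos hlt, if_pos hlt']
        apply find?_congr_mem
        intro e he
        rw [hpt e he]
        simp
      · have hlt' : ¬ (mfold (fun e => idxF (swP e) t) u t.length + 1 < (pf :: t).length) := by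
          simp only [List.length_cons]; omega
        rw [if_neg hlt, if_neg hlt']

-- B's fold returns the first element of u achieving the running minimum
lemma foldl_stepM_snd (u : List String) (f : String → Nat) (bi : Nat) (be : Option String) :
    (u.foldl (stepM f) (bi, be)).2 =
      if mfold f u bi < bi then u.find? (fun e => f e == mfold f u bi) else be := by
  induction u generalizing bi be with
  | nil =>
    simp only [List.foldl_nil, mfold]
    rw [if_neg (by omega)]
  | cons e t ih =>
    have hmc : mfold f (e :: t) bi = mfold f t (min bi (f e)) := rfl
    by_cases hlt : f e < bi
    · have hstep : stepM f (bi, be) e = (f e, some e) := by simp [stepM, hlt]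
      have hmin : min bi (f e) = f e := by omega
      simp only [List.foldl_cons, hstep]
      rw [ih (f e) (some e), hmc, hmin]
      have hlt2 : mfold f t (f e) < bi := lt_of_le_of_lt (mfold_le_init f t (f e)) hlt
      rw [if_pos hlt2]
      by_cases heq : mfold f t (f e) < f e
      · have hne : (f e == mfold f t (f e)) = false := by simp; omega
        rw [if_pos heq]
        simp [hne]
      · have hfe : (f e == mfold f t (f e)) = true := by
          have := mfold_le_init f t (f e); simp; omega
        rw [if_neg heq]
        simp [hfe]
    · have hstep : stepM f (bi, be) e = (bi, be) := by simp [stepM, hlt]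
      have hmin : min bi (f e) = bi := by omega
      simp only [List.foldl_cons, hstep]
      rw [ih bi be, hmc, hmin]
      by_cases hm : mfold f t bi < bi
      · have hne : (f e == mfold f t bi) = false := by simp; omega
        rw [if_pos hm, if_pos hm]
        simp [hne]
      · rw [if_neg hm, if_neg hm]

lemma takeWhile_eq_iff_prefix {l cs : List Char} (h : '@' ∈ l) (hcs : '@' ∉ cs) :
    l.takeWhile (· != '@') = cs ↔ (cs ++ ['@']) <+: l := by
  induction l generalizing cs with
  | nil => cases h
  | cons c l' ih =>
    by_cases hc : c = '@'
    · subst hc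
      cases cs with
      | nil => simp
      | cons d cs' =>
        constructor
        · intro he; simp at he
        · intro hp
          rw [List.cons_append, List.cons_prefix_cons] at hp
          exact absurd (hp.1 ▸ List.mem_cons_self) hcs
    · have hc' : (c != '@') = true := by simp [hc]
      have h' : '@' ∈ l' := by
        rcases List.mem_cons.mp h with h1 | h1
        · exact absurd h1.symm hc
        · exact h1
      cases cs with
      | nil =>
        constructor
        · intro he; simp [hc'] at he
        · intro hp
          rw [List.nil_append] at hp
          have : '@'::([] : List Char) <+: c :: l' := hp
          rw [List.cons_prefix_cons] at this
          exact absurd this.1.symm hc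
      | cons d cs' =>
        have hcs' : '@' ∉ cs' := fun hx => hcs (List.mem_cons_of_mem _ hx)
        have hd : d ≠ '@' := fun hx => hcs (hx ▸ List.mem_cons_self)
        constructor
        · intro he
          simp only [List.takeWhile_cons, hc', if_true] at he
          rcases List.cons.injEq .. ▸ he with ⟨rfl, h2⟩
          rw [List.cons_append, List.cons_prefix_cons]
          exact ⟨rfl, (ih h' hcs').mp h2⟩
        · intro hp
          rw [List.cons_append, List.cons_prefix_cons] at hp
          simp only [List.takeWhile_cons, hc', if_true]
          rw [hp.1]
          exact congrArg (c :: ·) ((ih h' hcs').mpr hp.2)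

lemma key_beq {l : List Char} (cs : List Char) (h : '@' ∈ l) (hcs : '@' ∉ cs) :
    (String.ofList (cs ++ ['@']) == String.ofList (l.takeWhile (· != '@') ++ ['@']))
      = PySem.Chars.startswith l (cs ++ ['@']) := by
  by_cases hp : (cs ++ ['@']) <+: l
  · have ht : l.takeWhile (· != '@') = cs := (takeWhile_eq_iff_prefix h hcs).mpr hp
    have hb : PySem.Chars.startswith l (cs ++ ['@']) = true := by
      rw [PySem.Chars.startswith_iff]; exact hp
    rw [ht, hb]
    simp
  · have ht : l.takeWhile (· != '@') ≠ cs := fun hh => hp ((takeWhile_eq_iff_prefix h hcs).mp hh)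
    have hb : PySem.Chars.startswith l (cs ++ ['@']) = false := by
      rw [← Bool.not_eq_true, PySem.Chars.startswith_iff]; exact hp
    rw [hb]
    simp only [beq_eq_false_iff_ne, ne_eq]
    intro hh
    have := congrArg String.toList hh
    rw [String.toList_ofList, String.toList_ofList] at this
    exact ht (List.append_inj_left' this rfl).symm

lemma startswith_false_of_no_at {l cs : List Char} (h : '@' ∉ l) :
    PySem.Chars.startswith l (cs ++ ['@']) = false := by
  rw [← Bool.not_eq_true, PySem.Chars.startswith_iff]
  intro hp
  exact h (hp.subset (List.mem_append.mpr (Or.inr List.mem_cons_self)))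

lemma idxF_le_length (P : String → Bool) (pfs : List String) : idxF P pfs ≤ pfs.length := by
  induction pfs with
  | nil => exact le_refl _
  | cons pf t ih =>
    simp only [idxF, List.length_cons]
    split <;> omega

lemma idxF_eq_length_of_false {P : String → Bool} {pfs : List String}
    (h : ∀ pf ∈ pfs, P pf = false) : idxF P pfs = pfs.length := by
  induction pfs with
  | nil => rfl
  | cons pf t ih =>
    simp only [idxF, h pf List.mem_cons_self, List.length_cons, Bool.false_eq_true, if_false]
    rw [ih (fun x hx => h x (List.mem_cons_of_mem _ hx))]

-- a dict mapping each pf to its position looks up the first-match index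
lemma get?_mk_zipIdx (pfs : List String) (off : Nat) (k : String) (P : String → Bool)
    (hP : ∀ pf ∈ pfs, (pf == k) = P pf) :
    (PySem.Dict.mk (pfs.zipIdx off)).get? k =
      if idxF P pfs < pfs.length then some (idxF P pfs + off) else none := by
  induction pfs generalizing off with
  | nil => simp [idxF, PySem.Dict.get?]
  | cons pf t ih =>
    rw [List.zipIdx_cons, PySem.Dict.get?_mk_cons, hP pf List.mem_cons_self]
    simp only [idxF, List.length_cons]
    cases hpf : P pf with
    | true => simp
    | false =>
      simp only [Bool.false_eq_true, if_false]
      rw [ih (off + 1) (fun x hx => hP x (List.mem_cons_of_mem _ hx))]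
      by_cases hlt : idxF P t < t.length
      · rw [if_pos hlt, if_pos (by omega)]
        congr 1
        omega
      · rw [if_neg hlt, if_neg (by omega)]

lemma prio_eq : prio = PySem.Dict.mk pfxList.zipIdx := by decide

-- each PFX entry is letters followed by '@'
lemma pfx_shape : ∀ pf ∈ pfxList, ∃ cs : List Char, pf = String.ofList (cs ++ ['@']) ∧ '@' ∉ cs := by
  intro pf hpf
  simp only [pfxList, List.mem_cons, List.not_mem_nil, or_false] at hpf
  rcases hpf with rfl | rfl | rfl | rfl | rfl | rfl | rfl | rfl | rfl
  · exact ⟨['i','n','f','o'], rfl, by decide⟩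
  · exact ⟨['k','o','n','t','a','k','t'], rfl, by decide⟩
  · exact ⟨['h','e','l','l','o'], rfl, by decide⟩
  · exact ⟨['s','a','l','e','s'], rfl, by decide⟩
  · exact ⟨['b','e','s','t','e','l','l','u','n','g'], rfl, by decide⟩
  · exact ⟨['s','h','o','p'], rfl, by decide⟩
  · exact ⟨['s','e','r','v','i','c','e'], rfl, by decide⟩
  · exact ⟨['o','f','f','i','c','e'], rfl, by decide⟩
  · exact ⟨['m','a','i','l'], rfl, by decide⟩

-- B's dict lookup computes exactly A's first-match index
lemma stepB_eq_stepM (st : Nat × Option String) (e : String) (hst : st.1 ≤ pfxList.length) :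
    stepB st e = stepM idxPfx st e := by
  have hlen : idxPfx e ≤ pfxList.length := idxF_le_length _ _
  by_cases hat : '@' ∈ e.toList
  · have hat' : e.toList.contains '@' = true := by simpa using hat
    have hP : ∀ pf ∈ pfxList, (pf == String.ofList (e.toList.takeWhile (· != '@') ++ ['@'])) = swP e pf := by
      intro pf hpf
      obtain ⟨cs, rfl, hcs⟩ := pfx_shape pf hpf
      rw [key_beq cs hat hcs]
      simp only [swP, PySem.Str.startswith_eq, String.toList_ofList]
    unfold stepB
    rw [if_pos hat', prio_eq, get?_mk_zipIdx pfxList 0 _ (swP e) hP]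
    by_cases hidx : idxF (swP e) pfxList < pfxList.length
    · rw [if_pos hidx]
      unfold stepM idxPfx
      simp
    · rw [if_neg hidx]
      unfold stepM idxPfx
      rw [if_neg (by unfold idxPfx at hlen; omega)]
  · have hat' : e.toList.contains '@' = false := by simpa using hat
    have hidx : idxPfx e = pfxList.length := by
      apply idxF_eq_length_of_false
      intro pf hpf
      obtain ⟨cs, rfl, hcs⟩ := pfx_shape pf hpf
      simp only [swP, PySem.Str.startswith_eq, String.toList_ofList]
      exact startswith_false_of_no_at hat
    unfold stepB
    rw [if_neg (by simp; exact hat)]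
    unfold stepM
    rw [if_neg (by omega)]

lemma foldl_stepB_eq (u : List String) (st : Nat × Option String) (hst : st.1 ≤ pfxList.length) :
    u.foldl stepB st = u.foldl (stepM idxPfx) st := by
  induction u generalizing st with
  | nil => rfl
  | cons e t ih =>
    simp only [List.foldl_cons]
    rw [stepB_eq_stepM st e hst]
    apply ih
    unfold stepM
    split
    · exact idxF_le_length _ _
    · exact hst

-- ===== VERDICT (by name: the statement is the Claim_ definition above) =====
theorem pick_email_spec : Claim_equal_pick_email := by
  intro es _
  unfold Spec_pick_email pick_email pick_email_alt
  by_cases hes : es = []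
  · simp [hes]
  · simp only [if_neg hes]
    have h2 : (normUnique es).foldl stepB (pfxList.length, none)
        = (normUnique es).foldl (stepM idxPfx) (pfxList.length, none) :=
      foldl_stepB_eq _ _ (le_refl _)
    have h3 := foldl_stepM_snd (normUnique es) idxPfx pfxList.length none
    have h1 := outerA_eq pfxList (normUnique es)
    have hfx : (fun e => idxF (swP e) pfxList) = idxPfx := rfl
    rw [hfx] at h1
    rw [h2, h3, h1]
    rfl
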